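-- pv_equiv track=rewrite | github.com/luuk00101/pppy | domace_ulohy/ulohy3.py | velkosti_akvaria
-- ===== SOURCE A (Python) =====
-- def velkosti_akvaria(velkost):
--     import itertools
--
--     kombinacie = itertools.permutations(range(velkost + 1), 3)
--
--     for kombinacia in kombinacie:
--         sucin = 1
--
--         for cislo in kombinacia:
--             sucin *= cislo
--
--         if sucin == velkost:
--             yield kombinacia
-- ===== SOURCE B (Python) =====
-- def velkosti_akvaria(velkost):
--     # Enumerate divisors instead of all O(n^3) permutations: pick a | velkost,
--     # then b | velkost//a, and compute the third factor c directly.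
--     for a in range(1, velkost + 1):
--         if velkost % a:
--             continue
--         m = velkost // a
--         for b in range(1, m + 1):
--             if m % b:
--                 continue
--             c = m // b
--             if a != b and b != c and a != c:
--                 yield (a, b, c)
-- ===== Notes on version B (the rewrite author's own statement) =====
-- stated objective: faster
-- what changed: Replaces the O(n^3) scan over all length-three permutations of range(n+1) with enumeration of divisors (a | n, then b | n//a) and direct computation of the third factor c = (n//a)//b.
import Mathlib
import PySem

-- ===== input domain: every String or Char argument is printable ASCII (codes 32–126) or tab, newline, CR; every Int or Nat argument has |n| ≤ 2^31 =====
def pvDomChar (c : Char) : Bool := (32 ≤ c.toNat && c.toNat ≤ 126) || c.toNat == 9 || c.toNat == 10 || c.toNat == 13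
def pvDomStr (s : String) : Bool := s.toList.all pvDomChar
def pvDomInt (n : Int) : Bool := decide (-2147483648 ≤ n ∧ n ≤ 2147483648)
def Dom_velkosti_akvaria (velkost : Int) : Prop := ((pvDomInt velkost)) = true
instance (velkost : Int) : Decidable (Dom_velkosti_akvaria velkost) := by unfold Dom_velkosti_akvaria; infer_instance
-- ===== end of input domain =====

-- B enumerates divisor pairs and computes the third factor instead of scanning all length-three permutations (asymptotically faster).

-- ===== PORT A =====
-- itertools.permutations(range(velkost+1), 3) = lexicographic nested loops over the
-- (pairwise distinct) range elements, skipping reused elements; the body multiplies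
-- the tuple's entries into sucin and yields the tuple when sucin == velkost.
def velkosti_akvaria (velkost : Int) : List (List Int) :=
  let r := PySem.List.pyRange 0 (velkost + 1) 1
  r.flatMap fun a =>
    r.flatMap fun b =>
      if b = a then [] else
        r.flatMap fun c =>
          if c = a ∨ c = b then [] else
            let sucin := [a, b, c].foldl (fun s x => s * x) 1
            if sucin = velkost then [[a, b, c]] else []

-- ===== PORT B =====
def velkosti_akvaria_alt (velkost : Int) : List (List Int) :=
  (PySem.List.pyRange 1 (velkost + 1) 1).flatMap fun a =>
    if PySem.Int.mod velkost a ≠ 0 then [] else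
      let m := PySem.Int.floordiv velkost a
      (PySem.List.pyRange 1 (m + 1) 1).flatMap fun b =>
        if PySem.Int.mod m b ≠ 0 then [] else
          let c := PySem.Int.floordiv m b
          if a ≠ b ∧ b ≠ c ∧ a ≠ c then [[a, b, c]] else []

-- ===== PRECONDITION & SPEC =====
def Spec_velkosti_akvaria (velkost : Int) (out : List (List Int)) : Prop := out = velkosti_akvaria_alt velkost
instance (velkost : Int) (out : List (List Int)) : Decidable (Spec_velkosti_akvaria velkost out) := by unfold Spec_velkosti_akvaria; infer_instance

-- ===== CLAIM (what is proved, stated in full; the proofs are below) =====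
def Claim_equal_velkosti_akvaria : Prop := ∀ (velkost : Int), Dom_velkosti_akvaria velkost → Spec_velkosti_akvaria velkost (velkosti_akvaria velkost)

-- ===== LEMMAS AND PROOFS =====

theorem flatMap_nil_of {α β : Type} (l : List α) (f : α → List β)
    (h : ∀ x ∈ l, f x = []) : l.flatMap f = [] :=
  List.flatMap_eq_nil_iff.mpr h

theorem flatMap_congr_mem {α β : Type} (l : List α) (f g : α → List β)
    (h : ∀ x ∈ l, f x = g x) : l.flatMap f = l.flatMap g := by
  induction l with
  | nil => rfl
  | cons a t ih =>
    simp only [List.flatMap_cons]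
    rw [h a (List.mem_cons_self), ih (fun x hx => h x (List.mem_cons_of_mem _ hx))]

theorem flatMap_eq_of_unique {α : Type} (l : List Int) (hnd : l.Nodup)
    (f : Int → List α) (c₀ : Int) (hc : c₀ ∈ l)
    (h : ∀ x ∈ l, x ≠ c₀ → f x = []) : l.flatMap f = f c₀ := by
  induction l with
  | nil => cases hc
  | cons a t ih =>
    simp only [List.flatMap_cons]
    rcases List.mem_cons.mp hc with rfl | hct
    · have : t.flatMap f = [] := by
        apply flatMap_nil_of
        intro x hx
        exact h x (List.mem_cons_of_mem _ hx)
          (fun hxc => ((List.nodup_cons.mp hnd).1 (hxc ▸ hx)))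
      rw [this, List.append_nil]
    · have ha : a ≠ c₀ := fun hac => (List.nodup_cons.mp hnd).1 (hac ▸ hct)
      rw [h a List.mem_cons_self ha,
        ih (List.nodup_cons.mp hnd).2 hct (fun x hx => h x (List.mem_cons_of_mem _ hx))]
      rfl

theorem velkosti_main (n : Int) : velkosti_akvaria n = velkosti_akvaria_alt n := by
  by_cases hpos : 0 < n
  case neg =>
    -- n ≤ 0: both sides are empty
    unfold velkosti_akvaria velkosti_akvaria_alt
    by_cases h0 : n = 0
    · subst h0; decide
    · rw [PySem.List.pyRange_one_eq_nil (by omega : (n:Int) + 1 ≤ 0),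
        PySem.List.pyRange_one_eq_nil (by omega : (n:Int) + 1 ≤ 1)]
      rfl
  case pos =>
    unfold velkosti_akvaria velkosti_akvaria_alt
    -- peel off the first element of a range-flatMap when its contribution is []
    have peel : ∀ (f : Int → List (List Int)), f 0 = [] →
        (PySem.List.pyRange 0 (n + 1) 1).flatMap f = (PySem.List.pyRange 1 (n + 1) 1).flatMap f := by
      intro f hf
      rw [PySem.List.pyRange_one_cons (by omega : (0:Int) < n + 1), List.flatMap_cons, hf,
        List.nil_append]
      norm_num
    rw [peel _ (by
      -- a = 0 contributes nothing: the product is 0 ≠ n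
      apply flatMap_nil_of; intro b _
      split
      · rfl
      · apply flatMap_nil_of; intro c _
        split
        · rfl
        · simp only [List.foldl, mul_zero, zero_mul]
          rw [if_neg (by omega)])]
    -- pointwise over a ∈ [1, n]
    apply flatMap_congr_mem
    intro a ha
    have ha' := (PySem.List.mem_pyRange_one).mp ha
    have ha1 : 1 ≤ a := ha'.1
    have han : a ≤ n := by omega
    by_cases hdvd : a ∣ n
    case neg =>
      -- a does not divide n: both contributions are []
      rw [if_pos (show PySem.Int.mod n a ≠ 0 from
        fun hmod => hdvd ((PySem.Int.mod_eq_zero_iff_dvd n a).mp hmod))]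
      apply flatMap_nil_of; intro b _
      split
      · rfl
      · apply flatMap_nil_of; intro c _
        split
        · rfl
        · simp only [List.foldl]
          rw [if_neg]
          intro hprod
          exact hdvd ⟨b * c, by linear_combination -hprod⟩
    case pos =>
      rw [if_neg (show ¬ (PySem.Int.mod n a ≠ 0) from
        not_not.mpr ((PySem.Int.mod_eq_zero_iff_dvd n a).mpr hdvd))]
      obtain ⟨m, hm⟩ := hdvd
      have ham : a ≠ 0 := by omega
      have hfd : PySem.Int.floordiv n a = m := by
        rw [PySem.Int.floordiv_eq_ediv_of_pos (by omega), hm]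
        exact Int.mul_ediv_cancel_left m ham
      rw [hfd]
      have hm1 : 1 ≤ m := by nlinarith
      have hmn : m ≤ n := by nlinarith
      -- A's b-loop over [0, n] reduces to [1, m]: b = 0 and b > m give no triples
      have drop : ∀ (f : Int → List (List Int)), f 0 = [] →
          (∀ x ∈ PySem.List.pyRange (m + 1) (n + 1) 1, f x = []) →
          (PySem.List.pyRange 0 (n + 1) 1).flatMap f = (PySem.List.pyRange 1 (m + 1) 1).flatMap f := by
        intro f h0 htail
        rw [PySem.List.pyRange_one_append 0 (m + 1) (n + 1) (by omega) (by omega),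
          List.flatMap_append, flatMap_nil_of _ _ htail, List.append_nil,
          PySem.List.pyRange_one_cons (by omega : (0:Int) < m + 1), List.flatMap_cons, h0,
          List.nil_append]
        norm_num
      rw [drop _
        (by
          -- b = 0: the product is 0 ≠ n
          split
          · rfl
          · apply flatMap_nil_of; intro c _
            split
            · rfl
            · simp only [List.foldl, mul_zero, zero_mul]
              rw [if_neg (by omega)])
        (by
          -- b > m: a*b > n, so no c ≥ 1 works and c = 0 gives product 0
          intro b hb
          have hb' := (PySem.List.mem_pyRange_one).mp hb
          split
          · rfl
          · apply flatMap_nil_of; intro c hc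
            have hc' := (PySem.List.mem_pyRange_one).mp hc
            split
            · rfl
            · simp only [List.foldl]
              rw [if_neg]
              intro hprod
              have hab : n < a * b := by nlinarith
              by_cases hc1 : 0 < c
              · nlinarith
              · have hc0' : c = 0 := by omega
                subst hc0'
                simp only [mul_zero] at hprod
                omega)]
      -- pointwise over b ∈ [1, m]
      apply flatMap_congr_mem
      intro b hb
      have hb' := (PySem.List.mem_pyRange_one).mp hb
      have hb1 : 1 ≤ b := hb'.1
      have hbm : b ≤ m := by omega
      by_cases hbd : b ∣ m
      case neg =>
        rw [if_pos (show PySem.Int.mod m b ≠ 0 from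
          fun hmod => hbd ((PySem.Int.mod_eq_zero_iff_dvd m b).mp hmod))]
        split
        · rfl
        · apply flatMap_nil_of; intro c _
          split
          · rfl
          · simp only [List.foldl]
            rw [if_neg]
            intro hprod
            refine hbd ⟨c, ?_⟩
            have hcan : a * m = a * (b * c) := by linear_combination -hprod - hm
            exact mul_left_cancel₀ ham hcan
      case pos =>
        rw [if_neg (show ¬ (PySem.Int.mod m b ≠ 0) from
          not_not.mpr ((PySem.Int.mod_eq_zero_iff_dvd m b).mpr hbd))]
        obtain ⟨c₀, hc₀⟩ := hbd
        have hbne : b ≠ 0 := by omega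
        have hfd2 : PySem.Int.floordiv m b = c₀ := by
          rw [PySem.Int.floordiv_eq_ediv_of_pos (by omega), hc₀]
          exact Int.mul_ediv_cancel_left c₀ hbne
        rw [hfd2]
        have hc1 : 1 ≤ c₀ := by nlinarith
        have hcn : c₀ ≤ n := by nlinarith
        simp only [List.foldl]
        by_cases hba : b = a
        · rw [if_pos hba, if_neg (show ¬ (a ≠ b ∧ b ≠ c₀ ∧ a ≠ c₀) by tauto)]
        · rw [if_neg hba]
          rw [flatMap_eq_of_unique (PySem.List.pyRange 0 (n + 1) 1)
            (PySem.List.nodup_pyRange_one 0 (n + 1))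
            _ c₀ ((PySem.List.mem_pyRange_one).mpr
              ⟨(by omega : (0:Int) ≤ c₀), (by omega : c₀ < n + 1)⟩)
            (fun x hx hxne => by
              split
              · rfl
              · rw [if_neg]
                intro hprod
                apply hxne
                have habne : a * b ≠ 0 := mul_ne_zero ham hbne
                have hcan : a * b * x = a * b * c₀ := by
                  linear_combination hprod + hm + (a : Int) * hc₀
                exact mul_left_cancel₀ habne hcan)]
          split
          · rename_i hcc
            rw [if_neg (show ¬ (a ≠ b ∧ b ≠ c₀ ∧ a ≠ c₀) by tauto)]
          · rename_i hcc
            push Not at hcc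
            rw [if_pos (show (1 : Int) * a * b * c₀ = n by
                linear_combination -hm - (a : Int) * hc₀),
              if_pos (show a ≠ b ∧ b ≠ c₀ ∧ a ≠ c₀ from
                ⟨fun h => hba h.symm, fun h => hcc.2 h.symm, fun h => hcc.1 h.symm⟩)]

-- ===== VERDICT (by name: the statement is the Claim_ definition above) =====
theorem velkosti_akvaria_spec : Claim_equal_velkosti_akvaria := by
  intro velkost _
  unfold Spec_velkosti_akvaria
  exact velkosti_main velkost
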